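-- pv_equiv track=rewrite | github.com/SnakeInTheLake/Training | Multitask.py | process
-- ===== SOURCE A (Python) =====
-- import heapq
--
-- def process(processors, times):
--     q, ans = [], []
--     heapq.heapify(q)
--     i = 0
--     while i < processors and times:
--         for el in times:
--             if el == 0:
--                 ans.append([str(i), str(0)])
--                 times.remove(el)
--                 break
--             else:
--                 heapq.heappush(q, [el, i])
--                 times.remove(el)
--                 ans.append([str(i), str(0)])
--                 i += 1
--                 break
--         if not q and not times:
--             return ans
--
--
--     for el in times:
--         t = heapq.heappop(q)
--         heapq.heappush(q, [el + t[0], t[1]])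
--         ans.append([str(t[1]), str(t[0])])
--     return ans
-- ===== SOURCE B (Python) =====
-- import heapq
--
-- def process(processors, times):
--     # Faster: walk times by index (no O(n) list.remove per task); same heap logic.
--     # Mimics A's side effect: the prefix consumed in phase 1 is deleted from times.
--     ans, heap = [], []
--     i, k, n = 0, 0, len(times)
--     while i < processors and k < n:
--         el = times[k]
--         ans.append([str(i), '0'])
--         if el != 0:
--             heapq.heappush(heap, [el, i])
--             i += 1
--         k += 1
--     del times[:k]
--     for el in times:
--         t = heapq.heappop(heap)
--         heapq.heappush(heap, [el + t[0], t[1]])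
--         ans.append([str(t[1]), str(t[0])])
--     return ans
-- ===== Notes on version B (the rewrite author's own statement) =====
-- stated objective: faster
-- what changed: B walks times by index and deletes the consumed prefix once with a slice, instead of A's per-task list.remove that rescans and shifts the list on every iteration; the heap scheduling logic is kept.
import Mathlib
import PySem

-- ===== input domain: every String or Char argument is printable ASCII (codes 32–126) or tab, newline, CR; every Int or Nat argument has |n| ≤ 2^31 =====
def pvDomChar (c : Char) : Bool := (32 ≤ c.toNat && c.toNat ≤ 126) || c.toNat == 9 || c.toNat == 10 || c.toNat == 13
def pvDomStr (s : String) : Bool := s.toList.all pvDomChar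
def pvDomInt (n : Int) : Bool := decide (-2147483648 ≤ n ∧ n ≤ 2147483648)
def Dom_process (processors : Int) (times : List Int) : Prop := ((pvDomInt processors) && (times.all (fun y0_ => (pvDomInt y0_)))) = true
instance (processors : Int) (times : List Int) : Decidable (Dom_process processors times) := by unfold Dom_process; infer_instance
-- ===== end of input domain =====

-- B replaces A's per-task list.remove (which rescans and shifts `times` each step, O(n^2))
-- with an index walk plus one slice deletion, keeping the same heap logic: O(n log p).
-- Both Pythons mutate `times` identically (the phase-1 prefix is removed in place);
-- the equivalence proved here is about the RETURN value.

-- ===== PORT A =====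
-- heapq is modeled as a multiset (plain list): push appends, pop removes a minimum
-- element under Python's list lexicographic order [time, proc]; with equal minima the
-- popped values are identical, so this is exact for heapq's observable behaviour.
def lexLt (a b : Int × Int) : Bool := a.1 < b.1 || (a.1 == b.1 && a.2 < b.2)

def heapPush (q : List (Int × Int)) (x : Int × Int) : List (Int × Int) := q ++ [x]

def heapPop (q : List (Int × Int)) : Option ((Int × Int) × List (Int × Int)) :=
  match q with
  | [] => none  -- heapq.heappop on an empty heap: IndexError
  | x :: xs =>
    let m := xs.foldl (fun m y => if lexLt y m then y else m) x
    some (m, (x :: xs).erase m)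

-- the `while i < processors and times:` loop of A; `for el in times: … break` inspects
-- times[0], and `times.remove(el)` with el = times[0] drops the head (first occurrence).
-- Sum.inr = the early `return ans`; Sum.inl = loop exit with (remaining times, i, q, ans).
def procLoop1 (processors i : Int) (times : List Int) (q : List (Int × Int))
    (ans : List (List String)) :
    (List Int × Int × List (Int × Int) × List (List String)) ⊕ List (List String) :=
  if i < processors then
    match times with
    | [] => Sum.inl ([], i, q, ans)
    | el :: rest =>
      if el = 0 then
        let ans' := ans ++ [[PySem.Int.toStr i, PySem.Int.toStr 0]]
        if q = [] ∧ rest = [] then Sum.inr ans'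
        else procLoop1 processors i rest q ans'
      else
        let q' := heapPush q (el, i)
        let ans' := ans ++ [[PySem.Int.toStr i, PySem.Int.toStr 0]]
        if q' = [] ∧ rest = [] then Sum.inr ans'
        else procLoop1 processors (i + 1) rest q' ans'
  else Sum.inl (times, i, q, ans)

-- the final `for el in times:` loop (identical lines in A and in B, shared here);
-- the none branch is Python's IndexError, excluded by Pre_process.
def phase2 (rest : List Int) (q : List (Int × Int)) (ans : List (List String)) :
    List (List String) :=
  match rest with
  | [] => ans
  | el :: rest' =>
    match heapPop q with
    | none => ans
    | some (t, q') =>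
      phase2 rest' (heapPush q' (el + t.1, t.2))
        (ans ++ [[PySem.Int.toStr t.2, PySem.Int.toStr t.1]])

def process (processors : Int) (times : List Int) : List (List String) :=
  match procLoop1 processors 0 times [] [] with
  | .inr ans => ans
  | .inl (rem, _i, q, ans) => phase2 rem q ans

-- ===== PORT B =====
-- Source B's index-walk loop: while i < processors and k < n, read times[k].
def altPhase1 (processors : Int) (times : List Int) (i : Int) (k : Nat)
    (q : List (Int × Int)) (ans : List (List String)) :
    Nat × List (Int × Int) × List (List String) :=
  if h : i < processors ∧ k < times.length then
    let el := times[k]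
    let ans' := ans ++ [[PySem.Int.toStr i, "0"]]
    if el ≠ 0 then altPhase1 processors times (i + 1) (k + 1) (heapPush q (el, i)) ans'
    else altPhase1 processors times i (k + 1) q ans'
  else (k, q, ans)
termination_by times.length - k
decreasing_by all_goals omega

def process_alt (processors : Int) (times : List Int) : List (List String) :=
  let r := altPhase1 processors times 0 0 [] []
  -- `del times[:k]` then iterating the rest: the remaining tasks are times.drop k (0 ≤ k ≤ n)
  phase2 (times.drop r.1) r.2.1 r.2.2

-- ===== PRECONDITION & SPEC =====
-- Pre_ excludes only the inputs where A raises: with processors ≤ 0 and a nonempty task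
-- list the first loop never runs and heapq.heappop is called on an empty heap (IndexError).
def Pre_process (processors : Int) (times : List Int) : Prop :=
  0 < processors ∨ times = []
instance (processors : Int) (times : List Int) : Decidable (Pre_process processors times) := by
  unfold Pre_process; infer_instance

def pvWitness_process : Int × List Int := (2, [3, 0, 1, 4])

def Spec_process (processors : Int) (times : List Int) (out : List (List String)) : Prop := out = process_alt processors times
instance (processors : Int) (times : List Int) (out : List (List String)) : Decidable (Spec_process processors times out) := by unfold Spec_process; infer_instance

-- ===== CLAIM (what is proved, stated in full; the proofs are below) =====
def Claim_equal_process : Prop := ∀ (processors : Int) (times : List Int), Dom_process processors times → Pre_process processors times → Spec_process processors times (process processors times)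

-- ===== LEMMAS AND PROOFS =====

theorem toStr_zero : PySem.Int.toStr 0 = "0" := by decide

-- chain A's loop-1 result through phase 2
def chainA (r : (List Int × Int × List (Int × Int) × List (List String)) ⊕ List (List String)) :
    List (List String) :=
  match r with
  | .inr a => a
  | .inl (rem, _i, q, a) => phase2 rem q a

theorem process_eq_chain (processors : Int) (times : List Int) :
    process processors times = chainA (procLoop1 processors 0 times [] []) := by
  unfold process chainA
  rcases procLoop1 processors 0 times [] [] with ⟨rem, i, q, a⟩ | a <;> rfl

theorem key (rest : List Int) : ∀ (processors : Int) (times : List Int) (k : Nat) (i : Int)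
    (q : List (Int × Int)) (ans : List (List String)), times.drop k = rest →
    chainA (procLoop1 processors i rest q ans)
      = (let r := altPhase1 processors times i k q ans
         phase2 (times.drop r.1) r.2.1 r.2.2) := by
  induction rest with
  | nil =>
    intro P times k i q ans hdrop
    have hk : times.length ≤ k := List.drop_eq_nil_iff.mp hdrop
    rw [procLoop1, altPhase1]
    have : ¬ (i < P ∧ k < times.length) := by omega
    rw [dif_neg this]
    simp only [hdrop]
    split <;> rfl
  | cons el rest' ih =>
    intro P times k i q ans hdrop
    have hk : k < times.length := by
      by_contra h
      rw [List.drop_eq_nil_iff.mpr (by omega)] at hdrop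
      simp at hdrop
    have hcons : times[k] :: times.drop (k + 1) = times.drop k :=
      List.getElem_cons_drop ..
    rw [hdrop] at hcons
    have hel : times[k] = el := (List.cons.injEq .. ▸ hcons).1
    have hrest : times.drop (k + 1) = rest' := (List.cons.injEq .. ▸ hcons).2
    by_cases hi : i < P
    · rw [altPhase1, dif_pos ⟨hi, hk⟩]
      simp only [hel]
      by_cases h0 : el = 0
      · -- zero-time task: A keeps i, B keeps i; both append [str i, "0"]
        rw [procLoop1, if_pos hi]
        simp only [h0, if_neg (by simp : ¬ (0 : Int) ≠ 0), toStr_zero]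
        by_cases hret : q = [] ∧ rest' = []
        · -- A's early return; B's loop just stops next step
          rw [if_pos hret, ← ih P times (k + 1) i q _ hrest]
          rcases hret with ⟨hq, hr⟩
          subst hr
          have hnil : ∀ (a : List (List String)), chainA (procLoop1 P i [] q a) = a := by
            intro a
            rw [procLoop1.eq_def]
            split <;> rfl
          rw [hnil]
          simp [chainA]
        · rw [if_neg hret]
          exact ih P times (k + 1) i q _ hrest
      · rw [procLoop1, if_pos hi]
        simp only [if_neg h0, if_pos (show el ≠ 0 from h0), toStr_zero]
        rw [if_neg (by simp [heapPush])]
        exact ih P times (k + 1) (i + 1) (heapPush q (el, i)) _ hrest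
    · rw [procLoop1, if_neg hi, altPhase1, dif_neg (by tauto)]
      simp only [chainA, hdrop]

-- ===== VERDICT (by name: the statement is the Claim_ definition above) =====
theorem process_spec : Claim_equal_process := by
  intro P times _ _
  unfold Spec_process process_alt
  rw [process_eq_chain]
  exact key times P times 0 0 [] [] rfl
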